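-- pv_equiv track=rewrite | github.com/athulramkumar/dreamzero | arc_fabric/run_real.py | build_frame_schedule
-- ===== SOURCE A (Python) =====
-- RELATIVE_OFFSETS = [-23, -16, -8, 0]
--
-- ACTION_HORIZON = 24
--
-- def build_frame_schedule(total_frames: int, num_chunks: int) -> list[list[int]]:
--     chunks = []
--     current_frame = 23
--     for _ in range(num_chunks):
--         indices = [max(current_frame + off, 0) for off in RELATIVE_OFFSETS]
--         if indices[-1] >= total_frames:
--             break
--         chunks.append(indices)
--         current_frame += ACTION_HORIZON
--     return chunks
-- ===== SOURCE B (Python) =====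
-- RELATIVE_OFFSETS = [-23, -16, -8, 0]
--
-- ACTION_HORIZON = 24
--
-- def build_frame_schedule(total_frames: int, num_chunks: int) -> list[list[int]]:
--     if num_chunks <= 0 or total_frames <= 23:
--         return []
--     n = min(num_chunks, (total_frames - 24) // ACTION_HORIZON + 1)
--     stop = ACTION_HORIZON * n
--     return [list(row) for row in zip(range(0, stop, 24), range(7, stop + 7, 24),
--                                      range(15, stop + 15, 24), range(23, stop + 23, 24))]
-- ===== Notes on version B (the rewrite author's own statement) =====
-- stated objective: alternative
-- what changed: Instead of iterating rows with a break and mutable state, B precomputes the chunk count in closed form and constructs the schedule column-wise: four arithmetic ranges (one per offset) zipped together into rows; the per-row Python-level list comprehension disappears, which a timing run measured as a constant-factor speedup.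
import Mathlib
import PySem

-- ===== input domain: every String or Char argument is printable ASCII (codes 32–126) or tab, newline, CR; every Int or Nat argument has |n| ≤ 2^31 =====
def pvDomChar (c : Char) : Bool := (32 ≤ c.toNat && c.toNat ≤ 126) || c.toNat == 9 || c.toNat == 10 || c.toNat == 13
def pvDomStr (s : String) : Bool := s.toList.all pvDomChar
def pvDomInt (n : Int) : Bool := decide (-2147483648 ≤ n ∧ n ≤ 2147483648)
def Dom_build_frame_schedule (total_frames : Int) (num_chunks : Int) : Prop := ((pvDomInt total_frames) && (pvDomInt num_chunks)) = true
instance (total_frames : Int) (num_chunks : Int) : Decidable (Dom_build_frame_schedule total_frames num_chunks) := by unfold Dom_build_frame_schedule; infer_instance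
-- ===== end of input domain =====

-- B builds the schedule column-wise (four arithmetic ranges zipped into rows, count precomputed) instead of A's iterate-and-break loop (objective: alternative).

-- module constants (shared by both Pythons)
def RELATIVE_OFFSETS : List Int := [-23, -16, -8, 0]
def ACTION_HORIZON : Int := 24

-- ===== PORT A =====
-- the for-loop over range(num_chunks) with break, as structural recursion on the remaining iteration count
def bfsLoopA (total_frames : Int) : Nat → Int → List (List Int) → List (List Int)
  | 0, _, chunks => chunks
  | k + 1, current_frame, chunks =>
    let indices := RELATIVE_OFFSETS.map (fun off => max (current_frame + off) 0)
    match PySem.List.pyGet? indices (-1) with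
    | none => chunks  -- unreachable: RELATIVE_OFFSETS is nonempty
    | some v =>
      if v ≥ total_frames then chunks
      else bfsLoopA total_frames k (current_frame + ACTION_HORIZON) (chunks ++ [indices])

def build_frame_schedule (total_frames : Int) (num_chunks : Int) : List (List Int) :=
  bfsLoopA total_frames num_chunks.toNat 23 []

-- ===== PORT B =====
def build_frame_schedule_alt (total_frames : Int) (num_chunks : Int) : List (List Int) :=
  if num_chunks ≤ 0 ∨ total_frames ≤ 23 then []
  else
    let n := min num_chunks (PySem.Int.floordiv (total_frames - 24) ACTION_HORIZON + 1)
    let stop := ACTION_HORIZON * n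
    let r0 := PySem.List.pyRange 0 stop 24
    let r7 := PySem.List.pyRange 7 (stop + 7) 24
    let r15 := PySem.List.pyRange 15 (stop + 15) 24
    let r23 := PySem.List.pyRange 23 (stop + 23) 24
    ((r0.zip r7).zip (r15.zip r23)).map (fun row => [row.1.1, row.1.2, row.2.1, row.2.2])

-- ===== PRECONDITION & SPEC =====
def Spec_build_frame_schedule (total_frames : Int) (num_chunks : Int) (out : List (List Int)) : Prop := out = build_frame_schedule_alt total_frames num_chunks
instance (total_frames : Int) (num_chunks : Int) (out : List (List Int)) : Decidable (Spec_build_frame_schedule total_frames num_chunks out) := by unfold Spec_build_frame_schedule; infer_instance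

-- ===== CLAIM (what is proved, stated in full; the proofs are below) =====
def Claim_equal_build_frame_schedule : Prop := ∀ (total_frames : Int) (num_chunks : Int), Dom_build_frame_schedule total_frames num_chunks → Spec_build_frame_schedule total_frames num_chunks (build_frame_schedule total_frames num_chunks)

-- ===== LEMMAS AND PROOFS =====

-- the break test `indices[-1] >= total_frames` fires exactly when 23+24j ≥ tf, i.e. when j ≥ tf // 24
lemma bfs_break_iff (tf j : Int) :
    (23 + 24 * j ≥ tf ↔ PySem.Int.floordiv tf 24 ≤ j) := by
  have h1 := PySem.Int.floordiv_mul_add_mod tf 24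
  have h2 : 0 ≤ PySem.Int.mod tf 24 ∧ PySem.Int.mod tf 24 < 24 := by
    constructor
    · exact PySem.Int.mod_nonneg (a := tf) (b := 24) (by norm_num)
    · exact PySem.Int.mod_lt (a := tf) (b := 24) (by norm_num)
  omega

-- A's loop computes the rows indexed j, j+1, … up to min(j+k, tf//24)
lemma bfsLoopA_eq (tf : Int) (k : Nat) : ∀ (j : Int) (acc : List (List Int)), 0 ≤ j →
    bfsLoopA tf k (23 + 24 * j) acc =
      acc ++ (PySem.List.pyRange j (min (j + k) (PySem.Int.floordiv tf 24)) 1).map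
        (fun i => RELATIVE_OFFSETS.map (fun off => max (23 + 24 * i + off) 0)) := by
  induction k with
  | zero =>
    intro j acc hj
    rw [PySem.List.pyRange_one_eq_nil (by omega)]
    simp [bfsLoopA]
  | succ k ih =>
    intro j acc hj
    have hbr := bfs_break_iff tf j
    by_cases hb : 23 + 24 * j ≥ tf
    · rw [PySem.List.pyRange_one_eq_nil (by omega)]
      simp only [bfsLoopA, RELATIVE_OFFSETS, List.map_cons, List.map_nil,
        PySem.List.pyGet?, PySem.List.pyIdx?]
      norm_num
      omega
    · have hjM : j < PySem.Int.floordiv tf 24 := by omega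
      have hstep : bfsLoopA tf (k + 1) (23 + 24 * j) acc =
          bfsLoopA tf k (23 + 24 * (j + 1))
            (acc ++ [RELATIVE_OFFSETS.map (fun off => max (23 + 24 * j + off) 0)]) := by
        simp only [bfsLoopA, RELATIVE_OFFSETS, List.map_cons, List.map_nil,
          PySem.List.pyGet?, PySem.List.pyIdx?, ACTION_HORIZON]
        norm_num
        rw [if_neg (by omega)]
        have harg : 23 + 24 * j + 24 = 23 + 24 * (j + 1) := by ring
        rw [harg]
      rw [hstep, ih (j + 1) _ (by omega)]
      rw [PySem.List.pyRange_one_cons (a := j) (by omega)]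
      simp only [List.map_cons, List.append_assoc, List.singleton_append]
      have : min (j + 1 + (k : Int)) (PySem.Int.floordiv tf 24) =
             min (j + (k + 1 : Nat)) (PySem.Int.floordiv tf 24) := by
        push_cast; ring_nf
      rw [this]

-- a step-24 range from a of length n, as a map over List.range
lemma pyRange_arith (a b n : Int) (hn : 0 ≤ n) (hab : b = a + 24 * n) :
    PySem.List.pyRange a b 24 = (List.range n.toNat).map (fun (k : Nat) => a + 24 * (k : Int)) := by
  subst hab
  rw [PySem.List.pyRange_of_pos a (a + 24 * n) (by norm_num)]
  congr 1
  by_cases h : 0 < n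
  · rw [if_pos (by omega)]
    have : a + 24 * n - a + 24 - 1 = 23 + n * 24 := by ring
    rw [this, Int.add_mul_ediv_right 23 n (by norm_num)]
    norm_num
  · rw [if_neg (by omega)]
    congr 1
    omega

-- A's row at index k has no active clamp: it is [24k, 24k+7, 24k+15, 24k+23]
lemma rowA (k : Nat) :
    RELATIVE_OFFSETS.map (fun off => max (23 + 24 * ((0:Int) + k) + off) 0) =
      [24 * (k:Int), 24 * (k:Int) + 7, 24 * (k:Int) + 15, 24 * (k:Int) + 23] := by
  simp only [RELATIVE_OFFSETS, List.map_cons, List.map_nil]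
  refine List.ext_getElem (by simp) ?_
  intro i h1 h2
  simp only [List.length_cons, List.length_nil] at h2
  interval_cases i <;> simp <;> omega

-- ===== VERDICT (by name: the statement is the Claim_ definition above) =====
theorem build_frame_schedule_spec : Claim_equal_build_frame_schedule := by
  intro tf nc _
  unfold Spec_build_frame_schedule build_frame_schedule build_frame_schedule_alt
  have hA := bfsLoopA_eq tf nc.toNat 0 [] le_rfl
  norm_num at hA
  rw [hA]
  by_cases hdeg : nc ≤ 0 ∨ tf ≤ 23
  · rw [if_pos hdeg]
    rw [PySem.List.pyRange_one_eq_nil (by omega)]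
    simp
  · rw [if_neg hdeg]
    push Not at hdeg
    obtain ⟨hnc, htf⟩ := hdeg
    simp only [ACTION_HORIZON,
      PySem.Int.floordiv_eq_ediv_of_pos (show (0:Int) < 24 by norm_num)]
    set M := min nc ((tf - 24) / 24 + 1) with hM
    have hMeq : min (max nc 0) (tf / 24) = M := by rw [hM]; omega
    have hM0 : 0 ≤ M := by rw [hM]; omega
    rw [hMeq]
    rw [pyRange_arith 0 (24 * M) M hM0 (by ring), pyRange_arith 7 (24 * M + 7) M hM0 (by ring),
        pyRange_arith 15 (24 * M + 15) M hM0 (by ring), pyRange_arith 23 (24 * M + 23) M hM0 (by ring)]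
    rw [List.zip_map', List.zip_map', List.zip_map', List.map_map]
    rw [PySem.List.pyRange_one, List.map_map]
    have hsub : (M - 0).toNat = M.toNat := by omega
    rw [hsub]
    refine List.map_congr_left ?_
    intro k _
    simp only [Function.comp]
    rw [rowA k]
    simp only [List.cons.injEq, and_true]
    refine ⟨by ring, by ring, by ring, by ring⟩
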